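-- pv_equiv track=rewrite | github.com/anonymity-developer/algorithm-study | 프로그래머스/2/17683. ［3차］ 방금그곡/［3차］ 방금그곡.py | convert_melody
-- ===== SOURCE A (Python) =====
-- def convert_melody(melody):
--     replaces = {
--         'C#': 'c', 'D#': 'd', 'F#': 'f',
--         'G#': 'g', 'A#': 'a', 'E#': 'e', 'B#': 'b'
--     }
--     for k, v in replaces.items():
--         melody = melody.replace(k, v)
--     return melody
-- ===== SOURCE B (Python) =====
-- def convert_melody(melody):
--     note_map = {'C': 'c', 'D': 'd', 'F': 'f', 'G': 'g', 'A': 'a', 'E': 'e', 'B': 'b'}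
--     out = []
--     i = 0
--     n = len(melody)
--     while i < n:
--         ch = melody[i]
--         if ch in note_map and i + 1 < n and melody[i + 1] == '#':
--             out.append(note_map[ch])
--             i += 2
--         else:
--             out.append(ch)
--             i += 1
--     return ''.join(out)
-- ===== Notes on version B (the rewrite author's own statement) =====
-- stated objective: alternative
-- what changed: Replaces seven full-string .replace passes with a single left-to-right scan that consumes each sharp note pair via one lookahead into a 7-entry letter-keyed dict.
import Mathlib
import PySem

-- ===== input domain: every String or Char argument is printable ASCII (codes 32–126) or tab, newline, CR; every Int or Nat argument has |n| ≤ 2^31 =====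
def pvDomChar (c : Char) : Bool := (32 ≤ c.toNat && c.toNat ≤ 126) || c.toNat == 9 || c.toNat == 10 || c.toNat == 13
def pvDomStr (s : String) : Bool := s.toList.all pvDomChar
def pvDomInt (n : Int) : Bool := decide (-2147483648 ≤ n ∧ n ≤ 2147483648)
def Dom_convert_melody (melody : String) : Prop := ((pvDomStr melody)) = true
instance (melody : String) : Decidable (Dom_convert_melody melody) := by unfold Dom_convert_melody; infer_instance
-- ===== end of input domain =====

-- B replaces A's seven full-string .replace passes by one left-to-right scan with a '#' lookahead (same return value).

-- ===== PORT A =====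
-- A's dict of two-char tokens, in Python insertion order.
def pvReplacesA : PySem.Dict String String :=
  PySem.Dict.ofList [("C#", "c"), ("D#", "d"), ("F#", "f"), ("G#", "g"), ("A#", "a"), ("E#", "e"), ("B#", "b")]

def convert_melody (melody : String) : String :=
  (PySem.Dict.items pvReplacesA).foldl (fun mel kv => PySem.Str.replace mel kv.1 kv.2) melody

-- ===== PORT B =====
-- B's dict keyed by the note letter alone.
def pvNoteMap : PySem.Dict Char Char :=
  PySem.Dict.ofList [('C', 'c'), ('D', 'd'), ('F', 'f'), ('G', 'g'), ('A', 'a'), ('E', 'e'), ('B', 'b')]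

-- B's while loop: one pass; consume note+'#' as a pair, else copy one char.
def pvScan (m : PySem.Dict Char Char) : List Char → List Char
  | [] => []
  | [c] => [c]
  | c :: d :: t =>
    match PySem.Dict.get? m c with
    | some v => if d = '#' then v :: pvScan m t else c :: pvScan m (d :: t)
    | none => c :: pvScan m (d :: t)

def convert_melody_alt (melody : String) : String :=
  String.ofList (pvScan pvNoteMap melody.toList)

-- ===== PRECONDITION & SPEC =====
def Spec_convert_melody (melody : String) (out : String) : Prop := out = convert_melody_alt melody
instance (melody : String) (out : String) : Decidable (Spec_convert_melody melody out) := by unfold Spec_convert_melody; infer_instance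

-- ===== CLAIM (what is proved, stated in full; the proofs are below) =====
def Claim_equal_convert_melody : Prop := ∀ (melody : String), Dom_convert_melody melody → Spec_convert_melody melody (convert_melody melody)

-- ===== LEMMAS AND PROOFS =====

-- One replace pass for a pattern [k, '#'] and one-char replacement [v], written structurally.
def pvRep (k v : Char) : List Char → List Char
  | [] => []
  | [c] => [c]
  | c :: d :: t => if c = k ∧ d = '#' then v :: pvRep k v t else c :: pvRep k v (d :: t)

lemma pvRep_cons_ne (k v c : Char) (t : List Char) (h : c ≠ k) :
    pvRep k v (c :: t) = c :: pvRep k v t := by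
  cases t with
  | nil => simp [pvRep]
  | cons d t => rw [pvRep, if_neg (by rintro ⟨rfl, -⟩; exact h rfl)]

lemma pvRep_cons_head_ne (k v c : Char) (x : List Char) (h : x.head? ≠ some '#') :
    pvRep k v (c :: x) = c :: pvRep k v x := by
  cases x with
  | nil => simp [pvRep]
  | cons d t => rw [pvRep, if_neg (by rintro ⟨-, rfl⟩; exact h rfl)]

lemma pvRep_not_prefix (k v c : Char) (t : List Char)
    (h : ¬ ([k, '#'].isPrefixOf (c :: t) = true)) :
    pvRep k v (c :: t) = c :: pvRep k v t := by
  cases t with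
  | nil => simp [pvRep]
  | cons d t =>
    rw [pvRep, if_neg]
    rintro ⟨rfl, rfl⟩
    exact h (by simp [List.isPrefixOf])

-- Chars.replace.go with enough fuel is pvRep.
lemma pvGo_spec (k v : Char) : ∀ (fuel : Nat) (l acc : List Char), l.length ≤ fuel →
    PySem.Chars.replace.go [k, '#'] [v] fuel l acc = acc.reverse ++ pvRep k v l := by
  intro fuel
  induction fuel with
  | zero =>
    intro l acc hl
    have : l = [] := List.eq_nil_of_length_eq_zero (Nat.le_zero.mp hl)
    subst this
    simp [PySem.Chars.replace.go, pvRep]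
  | succ n ih =>
    intro l acc hl
    cases l with
    | nil => simp [PySem.Chars.replace.go, pvRep]
    | cons c t =>
      by_cases hp : [k, '#'].isPrefixOf (c :: t) = true
      · cases t with
        | nil => simp [List.isPrefixOf] at hp
        | cons d t' =>
          have hck : k = c ∧ '#' = d := by
            simpa [List.isPrefixOf] using hp
          obtain ⟨rfl, rfl⟩ := hck
          rw [PySem.Chars.replace.go]
          simp only [hp, if_true]
          have hlen : t'.length ≤ n := by simp at hl; omega
          rw [show List.drop [k, '#'].length (k :: '#' :: t') = t' from rfl]
          rw [ih t' ([v].reverse ++ acc) hlen]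
          simp [pvRep]
      · rw [PySem.Chars.replace.go]
        simp only [hp, Bool.false_eq_true, if_false]
        have hlen : t.length ≤ n := by simp at hl; omega
        rw [ih t (c :: acc) hlen, pvRep_not_prefix k v c t hp]
        simp

lemma pvReplace_eq_rep (k v : Char) (l : List Char) :
    PySem.Chars.replace l [k, '#'] [v] = pvRep k v l := by
  rw [PySem.Chars.replace]
  simp only [List.isEmpty_cons, Bool.false_eq_true, if_false]
  exact pvGo_spec k v l.length l [] le_rfl

-- a value returned by get? is a value of some item
lemma pv_get_val {m : PySem.Dict Char Char} {c v : Char}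
    (h : PySem.Dict.get? m c = some v) : ∃ p ∈ m.items, p.2 = v := by
  unfold PySem.Dict.get? at h
  obtain ⟨p, hp, hv⟩ := Option.map_eq_some_iff.mp h
  exact ⟨p, List.mem_of_find?_eq_some hp, hv⟩

-- lookup in a dict extended (at the back) by a fresh pair
lemma pv_get_append (m : PySem.Dict Char Char) (k v c : Char) :
    PySem.Dict.get? (⟨m.items ++ [(k, v)]⟩ : PySem.Dict Char Char) c =
      match PySem.Dict.get? m c with
      | some w => some w
      | none => if c = k then some v else none := by
  unfold PySem.Dict.get?
  rw [show PySem.Dict.items (⟨m.items ++ [(k, v)]⟩ : PySem.Dict Char Char) = m.items ++ [(k, v)] from rfl]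
  rw [List.find?_append]
  cases hf : List.find? (fun p => p.1 == c) m.items with
  | some p => simp
  | none =>
    by_cases hc : c = k
    · subst hc; simp [List.find?, Option.or]
    · have hb : (k == c) = false := beq_eq_false_iff_ne.mpr (Ne.symm hc)
      simp [List.find?, Option.or, hb, hc]

lemma pvScan_cons_none (m : PySem.Dict Char Char) (c : Char) (t : List Char)
    (h : PySem.Dict.get? m c = none) : pvScan m (c :: t) = c :: pvScan m t := by
  cases t with
  | nil => simp [pvScan]
  | cons d t' => rw [pvScan, h]

lemma pvScan_cons₂_some (m : PySem.Dict Char Char) {c v : Char} (d : Char) (t : List Char)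
    (h : PySem.Dict.get? m c = some v) (hd : d = '#') :
    pvScan m (c :: d :: t) = v :: pvScan m t := by
  subst hd; simp [pvScan, h]

lemma pvScan_cons₂_some_ne (m : PySem.Dict Char Char) {c v : Char} (d : Char) (t : List Char)
    (h : PySem.Dict.get? m c = some v) (hd : d ≠ '#') :
    pvScan m (c :: d :: t) = c :: pvScan m (d :: t) := by
  simp [pvScan, h, hd]

lemma pvScan_cons₂_none (m : PySem.Dict Char Char) {c : Char} (d : Char) (t : List Char)
    (h : PySem.Dict.get? m c = none) :
    pvScan m (c :: d :: t) = c :: pvScan m (d :: t) := by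
  simp [pvScan, h]

-- heads that are not '#' stay not-'#' through the scan (no value is '#')
lemma pvScan_head_ne (m : PySem.Dict Char Char)
    (hvh : ∀ p ∈ m.items, p.2 ≠ '#') (c : Char) (t : List Char) (hc : c ≠ '#') :
    (pvScan m (c :: t)).head? ≠ some '#' := by
  cases t with
  | nil => simp [pvScan, hc]
  | cons d t' =>
    rw [pvScan]
    cases hg : PySem.Dict.get? m c with
    | none => simp [hc]
    | some w =>
      have hw : w ≠ '#' := by
        obtain ⟨p, hpmem, hpv⟩ := pv_get_val hg
        exact hpv ▸ hvh p hpmem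
      by_cases hd : d = '#' <;> simp [hd, hc, hw]

-- Key lemma: one replace pass after a scan over m extends the scan map by (k, v).
lemma pvRep_scan (k v : Char) (m : PySem.Dict Char Char)
    (hk : PySem.Dict.get? m k = none)
    (hhash : PySem.Dict.get? m '#' = none)
    (hvk : ∀ p ∈ m.items, p.2 ≠ k)
    (hvh : ∀ p ∈ m.items, p.2 ≠ '#') :
    ∀ (n : Nat) (l : List Char), l.length ≤ n →
      pvRep k v (pvScan m l) = pvScan ⟨m.items ++ [(k, v)]⟩ l := by
  intro n
  induction n with
  | zero =>
    intro l hl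
    have : l = [] := List.eq_nil_of_length_eq_zero (Nat.le_zero.mp hl)
    subst this; simp [pvScan, pvRep]
  | succ n ih =>
    intro l hl
    cases l with
    | nil => simp [pvScan, pvRep]
    | cons c t =>
      cases t with
      | nil => simp [pvScan, pvRep]
      | cons d t' =>
        have hlen₁ : t'.length ≤ n := by simp at hl; omega
        have hlen₂ : (d :: t').length ≤ n := by simp at hl ⊢; omega
        cases hg : PySem.Dict.get? m c with
        | some w =>
          have hwk : w ≠ k := by
            obtain ⟨p, hpmem, hpv⟩ := pv_get_val hg
            exact hpv ▸ hvk p hpmem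
          have hck : c ≠ k := fun h => by rw [h, hk] at hg; cases hg
          have hg' : PySem.Dict.get? (⟨m.items ++ [(k, v)]⟩ : PySem.Dict Char Char) c = some w := by
            rw [pv_get_append, hg]
          by_cases hd : d = '#'
          · rw [pvScan_cons₂_some m d t' hg hd]
            rw [pvRep_cons_ne k v w _ hwk, ih t' hlen₁]
            rw [pvScan_cons₂_some _ d t' hg' hd]
          · rw [pvScan_cons₂_some_ne m d t' hg hd]
            rw [pvRep_cons_ne k v c _ hck, ih (d :: t') hlen₂]
            rw [pvScan_cons₂_some_ne _ d t' hg' hd]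
        | none =>
          by_cases hck : c = k
          · subst hck
            have hg' : PySem.Dict.get? (⟨m.items ++ [(c, v)]⟩ : PySem.Dict Char Char) c = some v := by
              rw [pv_get_append, hg]; simp
            by_cases hd : d = '#'
            · subst hd
              rw [pvScan_cons₂_none m '#' t' hg]
              rw [pvScan_cons_none m '#' t' hhash]
              rw [pvRep, if_pos ⟨rfl, rfl⟩, ih t' hlen₁]
              rw [pvScan_cons₂_some _ '#' t' hg' rfl]
            · rw [pvScan_cons₂_none m d t' hg]
              rw [pvRep_cons_head_ne c v c _ (pvScan_head_ne m hvh d t' hd)]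
              rw [ih (d :: t') hlen₂]
              rw [pvScan_cons₂_some_ne _ d t' hg' hd]
          · have hg' : PySem.Dict.get? (⟨m.items ++ [(k, v)]⟩ : PySem.Dict Char Char) c = none := by
              rw [pv_get_append, hg]; simp [hck]
            rw [pvScan_cons₂_none m d t' hg]
            rw [pvRep_cons_ne k v c _ hck, ih (d :: t') hlen₂]
            rw [pvScan_cons₂_none _ d t' hg']

-- scanning with the empty map is the identity
lemma pvScan_empty : ∀ l : List Char, pvScan ⟨[]⟩ l = l := by
  intro l
  induction l with
  | nil => simp [pvScan]
  | cons c t ih =>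
    rw [pvScan_cons_none ⟨[]⟩ c t rfl, ih]

-- one instantiated step of pvRep_scan, stated on concrete literal dicts
lemma pvStep (k v : Char) (items : List (Char × Char))
    (hk : PySem.Dict.get? (⟨items⟩ : PySem.Dict Char Char) k = none)
    (hhash : PySem.Dict.get? (⟨items⟩ : PySem.Dict Char Char) '#' = none)
    (hvk : ∀ p ∈ items, p.2 ≠ k)
    (hvh : ∀ p ∈ items, p.2 ≠ '#') (l : List Char) :
    pvRep k v (pvScan ⟨items⟩ l) = pvScan ⟨items ++ [(k, v)]⟩ l :=
  pvRep_scan k v ⟨items⟩ hk hhash hvk hvh l.length l le_rfl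

-- ===== VERDICT (by name: the statement is the Claim_ definition above) =====
theorem convert_melody_spec : Claim_equal_convert_melody := by
  intro melody _
  unfold Spec_convert_melody convert_melody convert_melody_alt
  rw [show PySem.Dict.items pvReplacesA =
    [("C#", "c"), ("D#", "d"), ("F#", "f"), ("G#", "g"), ("A#", "a"), ("E#", "e"), ("B#", "b")] from rfl]
  simp only [List.foldl_cons, List.foldl_nil]
  simp only [PySem.Str.replace, String.toList_ofList]
  rw [show ("C#" : String).toList = ['C', '#'] from rfl, show ("c" : String).toList = ['c'] from rfl,
      show ("D#" : String).toList = ['D', '#'] from rfl, show ("d" : String).toList = ['d'] from rfl,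
      show ("F#" : String).toList = ['F', '#'] from rfl, show ("f" : String).toList = ['f'] from rfl,
      show ("G#" : String).toList = ['G', '#'] from rfl, show ("g" : String).toList = ['g'] from rfl,
      show ("A#" : String).toList = ['A', '#'] from rfl, show ("a" : String).toList = ['a'] from rfl,
      show ("E#" : String).toList = ['E', '#'] from rfl, show ("e" : String).toList = ['e'] from rfl,
      show ("B#" : String).toList = ['B', '#'] from rfl, show ("b" : String).toList = ['b'] from rfl]
  simp only [pvReplace_eq_rep]
  conv_lhs => rw [show melody.toList = pvScan ⟨[]⟩ melody.toList from (pvScan_empty _).symm]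
  rw [pvStep 'C' 'c' [] rfl rfl (by decide) (by decide)]
  simp only [List.nil_append]
  rw [pvStep 'D' 'd' [('C', 'c')] rfl rfl (by decide) (by decide)]
  simp only [List.cons_append, List.nil_append]
  rw [pvStep 'F' 'f' [('C', 'c'), ('D', 'd')] rfl rfl (by decide) (by decide)]
  simp only [List.cons_append, List.nil_append]
  rw [pvStep 'G' 'g' [('C', 'c'), ('D', 'd'), ('F', 'f')] rfl rfl (by decide) (by decide)]
  simp only [List.cons_append, List.nil_append]
  rw [pvStep 'A' 'a' [('C', 'c'), ('D', 'd'), ('F', 'f'), ('G', 'g')] rfl rfl (by decide) (by decide)]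
  simp only [List.cons_append, List.nil_append]
  rw [pvStep 'E' 'e' [('C', 'c'), ('D', 'd'), ('F', 'f'), ('G', 'g'), ('A', 'a')] rfl rfl (by decide) (by decide)]
  simp only [List.cons_append, List.nil_append]
  rw [pvStep 'B' 'b' [('C', 'c'), ('D', 'd'), ('F', 'f'), ('G', 'g'), ('A', 'a'), ('E', 'e')] rfl rfl (by decide) (by decide)]
  simp only [List.cons_append, List.nil_append]
  rfl
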